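-- pv_equiv track=rewrite | github.com/git-afsantos/haros | analyser/datamanage/db_exporter.py | jsonifyMetrics
-- ===== SOURCE A (Python) =====
-- def jsonifyMetrics(metrics):
--     c = len(metrics)
--     s = "[\n"
--     for m in metrics:
--         s += "  {\n"
--         s += '    "id": ' + str(m[0]) + ',\n'
--         s += '    "name": "' + (str(m[1] or "")).replace('"', "'").replace("\n", "") + "\",\n"
--         s += '    "description": "' + (str(m[2] or "")).replace('"', "'").replace("\n", "") + "\"\n"
--         c -= 1
--         if c > 0:
--             s += "  },\n"
--         else:
--             s += "  }\n"
--     s += "]"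
--     return s
-- ===== SOURCE B (Python) =====
-- def jsonifyMetrics(metrics):
--     def clean(v):
--         return str(v or "").replace('"', "'").replace("\n", "")
--     # build the output back to front: walking the metrics in reverse, the very
--     # first item seen is the list's last, so it alone takes the comma-less "  }\n"
--     pieces = ["]"]
--     close = "  }\n"
--     for m in reversed(metrics):
--         pieces.append('  {\n    "id": ' + str(m[0]) + ',\n    "name": "'
--                       + clean(m[1]) + '",\n    "description": "' + clean(m[2])
--                       + '"\n' + close)
--         close = "  },\n"
--     pieces.append("[\n")
--     pieces.reverse()
--     return "".join(pieces)
-- ===== Notes on version B (the rewrite author's own statement) =====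
-- stated objective: alternative
-- what changed: B builds the output back-to-front: it walks the metrics in reverse collecting pieces and a close-token state (' }\n' only for the first item seen, i.e. the list's last), then reverses and concatenates, so A's countdown counter and the last-element comparison inside the forward loop disappear.
import Mathlib
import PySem

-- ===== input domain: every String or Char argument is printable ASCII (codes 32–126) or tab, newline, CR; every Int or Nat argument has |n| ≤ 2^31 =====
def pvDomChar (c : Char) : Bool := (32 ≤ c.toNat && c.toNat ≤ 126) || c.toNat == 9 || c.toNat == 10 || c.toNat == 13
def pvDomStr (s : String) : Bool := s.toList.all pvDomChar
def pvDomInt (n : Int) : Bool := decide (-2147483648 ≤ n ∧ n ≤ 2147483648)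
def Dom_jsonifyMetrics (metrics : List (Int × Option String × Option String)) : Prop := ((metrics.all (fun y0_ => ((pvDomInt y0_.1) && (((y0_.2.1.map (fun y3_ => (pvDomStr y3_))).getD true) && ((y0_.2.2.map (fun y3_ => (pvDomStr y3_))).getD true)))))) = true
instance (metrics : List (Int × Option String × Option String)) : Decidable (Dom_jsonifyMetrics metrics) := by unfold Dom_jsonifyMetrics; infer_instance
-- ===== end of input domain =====

-- B builds the output back-to-front (reverse walk with a close-token state) instead of
-- A's forward loop with a countdown counter (objective: alternative; same cost).


-- shared cleaning: str(v or "").replace('"', "'").replace("\n", "") (both Pythons apply it verbatim)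
def pvClean (v : Option String) : String :=
  PySem.Str.replace (PySem.Str.replace (v.getD "") "\"" "'") "\n" ""

-- ===== PORT A =====
-- A's loop body: append the object block, decrement the counter, pick "  },\n" vs "  }\n"
def pvStepA : (String × Int) → (Int × Option String × Option String) → String × Int
  | (s, c), m =>
    let s := s ++ "  {\n"
      ++ "    \"id\": " ++ PySem.Int.toStr m.1 ++ ",\n"
      ++ "    \"name\": \"" ++ pvClean m.2.1 ++ "\",\n"
      ++ "    \"description\": \"" ++ pvClean m.2.2 ++ "\"\n"
    let c := c - 1
    if c > 0 then (s ++ "  },\n", c) else (s ++ "  }\n", c)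

def jsonifyMetrics (metrics : List (Int × Option String × Option String)) : String :=
  (metrics.foldl pvStepA ("[\n", (metrics.length : Int))).1 ++ "]"

-- ===== PORT B =====
-- the object block up to (and excluding) the closing brace line
def pvBlockB (m : Int × Option String × Option String) : String :=
  "  {\n    \"id\": " ++ PySem.Int.toStr m.1 ++ ",\n    \"name\": \"" ++ pvClean m.2.1
    ++ "\",\n    \"description\": \"" ++ pvClean m.2.2 ++ "\"\n"

-- B's reverse-walk body: append the piece, switch the close token to the comma form
def pvStepB : (List String × String) → (Int × Option String × Option String) → List String × String
  | (pieces, close), m => (pieces ++ [pvBlockB m ++ close], "  },\n")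

def jsonifyMetrics_alt (metrics : List (Int × Option String × Option String)) : String :=
  let st := metrics.reverse.foldl pvStepB (["]"], "  }\n")
  PySem.Str.join "" (st.1 ++ ["[\n"]).reverse

-- ===== PRECONDITION & SPEC =====
def Spec_jsonifyMetrics (metrics : List (Int × Option String × Option String)) (out : String) : Prop := out = jsonifyMetrics_alt metrics
instance (metrics : List (Int × Option String × Option String)) (out : String) : Decidable (Spec_jsonifyMetrics metrics out) := by unfold Spec_jsonifyMetrics; infer_instance

-- ===== CLAIM =====
def Claim_equal_jsonifyMetrics : Prop := ∀ (metrics : List (Int × Option String × Option String)), Dom_jsonifyMetrics metrics → Spec_jsonifyMetrics metrics (jsonifyMetrics metrics)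

-- ===== LEMMAS AND PROOFS =====

-- the common shape of the list body: each block followed by its closing-brace line
def pvTail : List (Int × Option String × Option String) → String
  | [] => ""
  | [m] => pvBlockB m ++ "  }\n"
  | m :: rest@(_ :: _) => pvBlockB m ++ "  },\n" ++ pvTail rest

-- the same shape as the list of pieces in order (B collects them reversed)
def pvPieces : List (Int × Option String × Option String) → List String
  | [] => []
  | [m] => [pvBlockB m ++ "  }\n"]
  | m :: rest@(_ :: _) => (pvBlockB m ++ "  },\n") :: pvPieces rest

lemma pvLoopA (ms : List (Int × Option String × Option String)) :
    ∀ (s0 : String) (c : Int), c = ms.length →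
      (ms.foldl pvStepA (s0, c)).1 = s0 ++ pvTail ms := by
  induction ms with
  | nil => intro s0 c _; simp [pvTail]
  | cons m rest ih =>
    intro s0 c hcv
    rw [List.foldl_cons]
    simp only [pvStepA]
    cases rest with
    | nil =>
      rw [if_neg (show ¬ ((s0, c).2 - 1 > 0) from by
        change ¬ (c - 1 > 0); subst hcv; simp)]
      apply String.toList_inj.mp
      simp [pvTail, pvBlockB, String.append_assoc]
    | cons r rs =>
      rw [if_pos (show (s0, c).2 - 1 > 0 from by
        change c - 1 > 0; subst hcv; push_cast [List.length_cons]; omega)]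
      rw [ih _ _ (by subst hcv; push_cast [List.length_cons]; omega)]
      apply String.toList_inj.mp
      simp [pvTail, pvBlockB, String.append_assoc]

-- B's fold over the reversed list collects exactly the pieces, reversed, after "]"
lemma pvLoopB (ms : List (Int × Option String × Option String)) :
    ms.reverse.foldl pvStepB (["]"], "  }\n")
      = (["]"] ++ (pvPieces ms).reverse, if ms = [] then "  }\n" else "  },\n") := by
  induction ms with
  | nil => simp [pvPieces]
  | cons m rest ih =>
    rw [List.reverse_cons, List.foldl_append, ih, List.foldl_cons, List.foldl_nil]
    cases rest with
    | nil => simp [pvStepB, pvPieces]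
    | cons r rs => simp [pvStepB, pvPieces]

-- join with the empty separator is flatten
lemma pvJoinEmpty (L : List (List Char)) : PySem.Chars.join [] L = L.flatten := by
  induction L with
  | nil => simp [PySem.Chars.join, List.intercalate]
  | cons p rest ih =>
    cases rest with
    | nil => simp [PySem.Chars.join_singleton]
    | cons q qs => rw [PySem.Chars.join_cons_cons, ih]; simp

-- flattening the pieces is pvTail
lemma pvJoinPieces (ms : List (Int × Option String × Option String)) :
    (List.map String.toList (pvPieces ms)).flatten = (pvTail ms).toList := by
  induction ms with
  | nil => simp [pvPieces, pvTail]
  | cons m rest ih =>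
    cases rest with
    | nil => simp [pvPieces, pvTail]
    | cons r rs =>
      simp only [pvPieces, pvTail, List.map_cons, List.flatten_cons, ih]
      simp [String.append_assoc]

lemma pvAltEq (ms : List (Int × Option String × Option String)) :
    jsonifyMetrics_alt ms = "[\n" ++ pvTail ms ++ "]" := by
  apply String.toList_inj.mp
  simp only [jsonifyMetrics_alt, pvLoopB]
  rw [show ((["]"] ++ (pvPieces ms).reverse, if ms = [] then "  }\n" else "  },\n").1 ++ ["[\n"]).reverse
        = "[\n" :: (pvPieces ms ++ ["]"]) from by simp]
  rw [PySem.Str.toList_join]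
  rw [show String.toList "" = [] from rfl, pvJoinEmpty]
  simp [pvJoinPieces, String.append_assoc]

-- ===== VERDICT =====
theorem jsonifyMetrics_spec : Claim_equal_jsonifyMetrics := by
  intro ms _
  show jsonifyMetrics ms = jsonifyMetrics_alt ms
  rw [jsonifyMetrics, pvLoopA ms "[\n" _ rfl, pvAltEq]
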